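-- pv_equiv track=rewrite | github.com/FireShade3DS/whitvm | src/whitvm/minifier.py | _apply_label_map
-- ===== SOURCE A (Python) =====
-- from typing import Union, Dict, Any
--
-- def _apply_label_map(line: str, label_map: Dict[str, str]) -> str:
--     """Replace label names with shortened versions"""
--     if not label_map:
--         return line
--
--     result = []
--     i = 0
--
--     while i < len(line):
--         if line[i] == ':':
--             j = i + 1
--             while j < len(line) and line[j] != ':':
--                 j += 1
--             if j < len(line) and line[j] == ':':
--                 label_name = line[i+1:j]
--                 if label_name in label_map:
--                     result.append(f':{label_map[label_name]}:')
--                 else: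
--                     result.append(line[i:j+1])
--                 i = j + 1
--             else:
--                 result.append(line[i])
--                 i += 1
--         else:
--             result.append(line[i])
--             i += 1
--
--     return ''.join(result)
-- ===== SOURCE B (Python) =====
-- def _apply_label_map(line: str, label_map: dict) -> str:
--     """Replace label names with shortened versions"""
--     if not label_map:
--         return line
--
--     parts = line.split(':')
--     out = [parts[0]]
--     i = 1
--     while i < len(parts) - 1:
--         label = parts[i]
--         out.append(':' + label_map.get(label, label) + ':')
--         out.append(parts[i + 1])
--         i += 2
--     if i < len(parts):
--         out.append(':' + parts[i])
--     return ''.join(out)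
-- ===== Notes on version B (the rewrite author's own statement) =====
-- stated objective: simpler
-- what changed: Replaces A's index-based while-loop character scanner (with a nested inner scan for each closing colon and per-character appends) by a single line.split(':') followed by stitching the pieces back together two at a time, looking each label piece up with dict.get.
import Mathlib
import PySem

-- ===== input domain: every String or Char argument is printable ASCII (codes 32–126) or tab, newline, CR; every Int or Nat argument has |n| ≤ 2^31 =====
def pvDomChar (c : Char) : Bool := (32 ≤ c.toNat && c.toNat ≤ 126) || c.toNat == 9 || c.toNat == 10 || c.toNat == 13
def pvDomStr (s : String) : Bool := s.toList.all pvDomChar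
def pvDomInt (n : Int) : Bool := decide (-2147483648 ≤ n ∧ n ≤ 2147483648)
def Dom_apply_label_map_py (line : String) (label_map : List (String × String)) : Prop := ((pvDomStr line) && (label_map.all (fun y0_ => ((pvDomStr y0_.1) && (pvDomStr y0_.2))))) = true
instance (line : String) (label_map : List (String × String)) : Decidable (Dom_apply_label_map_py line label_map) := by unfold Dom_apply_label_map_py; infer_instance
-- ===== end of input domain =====

-- ===== PORT A =====
-- B replaces A's hand-written two-level character scanner with a single split on ':' plus a stitch over the pieces (simpler).

-- inner "while j < len(line) and line[j] != ':'" scan: (chars strictly before the next ':', remainder starting at that ':')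
def pvScanA : List Char → List Char × List Char
  | [] => ([], [])
  | c :: t => if c = ':' then ([], c :: t) else (c :: (pvScanA t).1, (pvScanA t).2)

theorem pvScanA_snd_length (l : List Char) : (pvScanA l).2.length ≤ l.length := by
  induction l with
  | nil => simp [pvScanA]
  | cons c t ih =>
    simp only [pvScanA]
    split
    · simp
    · simpa using Nat.le_succ_of_le ih

-- outer while loop of A, recursing on the unread suffix of the line
def pvGoA (lm : List (String × String)) : List Char → List Char
  | [] => []
  | c :: rest =>
    if c = ':' then
      if (pvScanA rest).2.head? = some ':' then
        -- j < len(line) and line[j] == ':' — a closing colon was found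
        (match PySem.Dict.get? (PySem.Dict.mk lm) (String.ofList (pvScanA rest).1) with
         | some v => ':' :: (v.toList ++ [':'])
         | none => ':' :: ((pvScanA rest).1 ++ [':'])) ++ pvGoA lm (pvScanA rest).2.tail
      else ':' :: pvGoA lm rest
    else c :: pvGoA lm rest
termination_by cs => cs.length
decreasing_by
  · have hl := pvScanA_snd_length rest
    simp
    omega
  · simp
  · simp

def apply_label_map_py (line : String) (label_map : List (String × String)) : String :=
  if label_map.isEmpty then line
  else String.ofList (pvGoA label_map line.toList)

-- ===== PORT B =====
-- stitches line.split(':') back together, two pieces per iteration (a label piece and the literal piece after it)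
def pvGoB (lm : List (String × String)) : List (List Char) → List Char
  | [] => []
  | [a] => a
  | [a, b] => a ++ ':' :: b
  | a :: b :: rest =>
    a ++ ':' :: (PySem.Dict.getD (PySem.Dict.mk lm) (String.ofList b) (String.ofList b)).toList ++ ':' :: pvGoB lm rest

def apply_label_map_py_alt (line : String) (label_map : List (String × String)) : String :=
  if label_map.isEmpty then line
  else String.ofList (pvGoB label_map (PySem.Chars.splitOn line.toList [':']))

-- ===== PRECONDITION & SPEC =====
def Spec_apply_label_map_py (line : String) (label_map : List (String × String)) (out : String) : Prop := out = apply_label_map_py_alt line label_map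
instance (line : String) (label_map : List (String × String)) (out : String) : Decidable (Spec_apply_label_map_py line label_map out) := by unfold Spec_apply_label_map_py; infer_instance

-- ===== CLAIM (what is proved, stated in full; the proofs are below) =====
def Claim_equal_apply_label_map_py : Prop := ∀ (line : String) (label_map : List (String × String)), Dom_apply_label_map_py line label_map → Spec_apply_label_map_py line label_map (apply_label_map_py line label_map)

-- ===== LEMMAS AND PROOFS =====

-- proof-only model of line.split(':')
def pvSplit : List Char → List (List Char)
  | [] => [[]]
  | c :: t => if c = ':' then [] :: pvSplit t else (c :: (pvSplit t).headI) :: (pvSplit t).tail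

theorem pvSplit_ne_nil (l : List Char) : pvSplit l ≠ [] := by
  cases l with
  | nil => simp [pvSplit]
  | cons c t => simp only [pvSplit]; split <;> simp

theorem pvSplit_cons_self (l : List Char) : pvSplit l = (pvSplit l).headI :: (pvSplit l).tail := by
  cases hp : pvSplit l with
  | nil => exact absurd hp (pvSplit_ne_nil l)
  | cons h t => simp

theorem splitOn_go_eq (l : List Char) : ∀ (fuel : Nat), l.length < fuel → ∀ (cur : List Char) (acc : List (List Char)),
    PySem.Chars.splitOn.go [':'] fuel l cur acc
      = acc.reverse ++ (cur.reverse ++ (pvSplit l).headI) :: (pvSplit l).tail := by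
  induction l with
  | nil =>
    intro fuel hf cur acc
    match fuel, hf with
    | fuel + 1, _ => simp [PySem.Chars.splitOn.go, pvSplit]
  | cons c t ih =>
    intro fuel hf cur acc
    match fuel, hf with
    | fuel + 1, hf =>
      by_cases hc : c = ':'
      · subst hc
        rw [show PySem.Chars.splitOn.go [':'] (fuel + 1) (':' :: t) cur acc
              = PySem.Chars.splitOn.go [':'] fuel t [] (cur.reverse :: acc) by
            rw [PySem.Chars.splitOn.go.eq_def]
            simp [List.isPrefixOf]]
        rw [ih fuel (by simpa using hf) [] (cur.reverse :: acc)]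
        simp only [pvSplit, reduceIte]
        conv_rhs => rw [pvSplit_cons_self t]
        simp
      · rw [show PySem.Chars.splitOn.go [':'] (fuel + 1) (c :: t) cur acc
              = PySem.Chars.splitOn.go [':'] fuel t (c :: cur) acc by
            rw [PySem.Chars.splitOn.go.eq_def]
            simp [List.isPrefixOf]
            exact fun h' => absurd h'.symm hc]
        rw [ih fuel (by simpa using hf) (c :: cur) acc]
        simp [pvSplit, hc]

theorem splitOn_eq_pvSplit (l : List Char) : PySem.Chars.splitOn l [':'] = pvSplit l := by
  rw [PySem.Chars.splitOn, splitOn_go_eq l (l.length + 1) (by omega) [] []]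
  simp [← pvSplit_cons_self]

theorem pvSplit_scan (l : List Char) :
    pvSplit l = (pvScanA l).1 :: (match (pvScanA l).2 with | [] => ([] : List (List Char)) | _ :: t => pvSplit t) := by
  induction l with
  | nil => simp [pvSplit, pvScanA]
  | cons c t ih =>
    by_cases hc : c = ':'
    · subst hc; simp [pvSplit, pvScanA]
    · simp only [pvSplit, pvScanA, if_neg hc]
      rw [ih]
      simp

theorem pvScanA_snd_shape (l : List Char) :
    (pvScanA l).2 = [] ∨ ∃ t, (pvScanA l).2 = ':' :: t := by
  induction l with
  | nil => simp [pvScanA]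
  | cons c t ih =>
    by_cases hc : c = ':'
    · subst hc; right; exact ⟨t, by simp [pvScanA]⟩
    · simpa [pvScanA, hc] using ih

theorem pvScanA_fst_of_nil (l : List Char) (h : (pvScanA l).2 = []) : (pvScanA l).1 = l := by
  induction l with
  | nil => simp [pvScanA]
  | cons c t ih =>
    by_cases hc : c = ':'
    · subst hc; simp [pvScanA] at h
    · simp [pvScanA, hc] at h ⊢
      exact ih h

theorem pvGoA_of_scan_nil (lm : List (String × String)) (l : List Char) (h : (pvScanA l).2 = []) :
    pvGoA lm l = l := by
  induction l with
  | nil => simp [pvGoA]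
  | cons c t ih =>
    by_cases hc : c = ':'
    · subst hc; simp [pvScanA] at h
    · simp [pvScanA, hc] at h
      rw [pvGoA]
      simp [hc, ih h]

theorem pvGoA_colon_nil (lm : List (String × String)) (rest : List Char) (h : (pvScanA rest).2 = []) :
    pvGoA lm (':' :: rest) = ':' :: pvGoA lm rest := by
  rw [pvGoA]
  simp [h]

theorem pvGoA_colon_found (lm : List (String × String)) (rest after : List Char)
    (h : (pvScanA rest).2 = ':' :: after) :
    pvGoA lm (':' :: rest)
      = (match PySem.Dict.get? (PySem.Dict.mk lm) (String.ofList (pvScanA rest).1) with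
         | some v => ':' :: (v.toList ++ [':'])
         | none => ':' :: ((pvScanA rest).1 ++ [':'])) ++ pvGoA lm after := by
  rw [pvGoA]
  simp [h]

theorem pvGoB_cons_cons (lm : List (String × String)) (c : Char) (h : List Char) (t : List (List Char)) :
    pvGoB lm ((c :: h) :: t) = c :: pvGoB lm (h :: t) := by
  match t with
  | [] => simp [pvGoB]
  | [b] => simp [pvGoB]
  | b :: r :: rs => simp [pvGoB]

theorem pvGoA_eq_pvGoB_pvSplit (lm : List (String × String)) :
    ∀ (n : Nat) (cs : List Char), cs.length ≤ n → pvGoA lm cs = pvGoB lm (pvSplit cs) := by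
  intro n
  induction n with
  | zero =>
    intro cs hcs
    have : cs = [] := List.eq_nil_of_length_eq_zero (Nat.le_zero.mp hcs)
    subst this
    simp [pvGoA, pvSplit, pvGoB]
  | succ n ih =>
    intro cs hcs
    match cs with
    | [] => simp [pvGoA, pvSplit, pvGoB]
    | c :: rest =>
      by_cases hc : c = ':'
      · subst hc
        rcases pvScanA_snd_shape rest with hnil | ⟨after, hafter⟩
        · -- no closing colon: A copies rest verbatim; split yields exactly two pieces
          have hsplit : pvSplit rest = [(pvScanA rest).1] := by
            rw [pvSplit_scan rest, hnil]
          rw [pvGoA_colon_nil lm rest hnil, pvGoA_of_scan_nil lm rest hnil]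
          simp only [pvSplit, reduceIte]
          rw [hsplit, pvScanA_fst_of_nil rest hnil]
          simp [pvGoB]
        · -- closing colon found
          have hlen : after.length ≤ n := by
            have := pvScanA_snd_length rest
            rw [hafter] at this
            simp at this hcs
            omega
          have h1 : pvSplit rest = (pvScanA rest).1 :: pvSplit after := by
            rw [pvSplit_scan rest, hafter]
          have hsplit : pvSplit (':' :: rest) = [] :: (pvScanA rest).1 :: pvSplit after := by
            simp [pvSplit, h1]
          rw [pvGoA_colon_found lm rest after hafter, ih after hlen, hsplit]
          rw [pvSplit_cons_self after]
          simp only [pvGoB]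
          rw [PySem.Dict.getD, ← pvSplit_cons_self after]
          cases hget : PySem.Dict.get? (PySem.Dict.mk lm) (String.ofList (pvScanA rest).1) <;>
            simp [String.toList_ofList]
      · have hIH : pvGoA lm rest = pvGoB lm (pvSplit rest) := by
          apply ih
          simp at hcs
          omega
        rw [show pvGoA lm (c :: rest) = c :: pvGoA lm rest by rw [pvGoA]; simp [hc]]
        simp only [pvSplit, if_neg hc]
        rw [pvGoB_cons_cons, ← pvSplit_cons_self, hIH]

-- ===== VERDICT (by name: the statement is the Claim_ definition above) =====
theorem apply_label_map_py_spec : Claim_equal_apply_label_map_py := by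
  intro line label_map _
  unfold Spec_apply_label_map_py apply_label_map_py apply_label_map_py_alt
  by_cases h : label_map.isEmpty
  · simp [h]
  · simp only [h, Bool.false_eq_true, if_false]
    rw [splitOn_eq_pvSplit, pvGoA_eq_pvGoB_pvSplit label_map line.toList.length line.toList le_rfl]
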